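-- pv_equiv track=rewrite | github.com/Scardullo/pyohmine | linux_utils.py | parse_symbolic_mode
-- ===== SOURCE A (Python) =====
-- import stat
--
-- def parse_symbolic_mode(sym: str) -> int:
--     mode = 0
--     for part in sym.split(","):
--         who, perms = part.split("=")
--         mask = 0
--         if "r" in perms:
--             mask |= stat.S_IRUSR | stat.S_IRGRP | stat.S_IROTH
--         if "w" in perms:
--             mask |= stat.S_IWUSR | stat.S_IWGRP | stat.S_IWOTH
--         if "x" in perms:
--             mask |= stat.S_IXUSR | stat.S_IXGRP | stat.S_IXOTH
--         bits = 0
--         if "u" in who: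
--             bits |= (mask & (stat.S_IRWXU))
--         if "g" in who:
--             bits |= (mask & (stat.S_IRWXG))
--         if "o" in who:
--             bits |= (mask &(stat.S_IRWXO))
--         mode |= bits
--     return mode
-- ===== SOURCE B (Python) =====
-- # stat.S_I{R,W,X}{USR,GRP,OTH} spelled as the literal bits
-- _BIT = {
--     "u": {"r": 0o400, "w": 0o200, "x": 0o100},
--     "g": {"r": 0o040, "w": 0o020, "x": 0o010},
--     "o": {"r": 0o004, "w": 0o002, "x": 0o001},
-- }
--
--
-- def parse_symbolic_mode(sym: str) -> int:
--     mode = 0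
--     for part in sym.split(","):
--         who, perms = part.split("=")
--         for w in who:
--             table = _BIT.get(w)
--             if table is None:
--                 continue
--             for p in perms:
--                 mode |= table.get(p, 0)
--     return mode
-- ===== Notes on version B (the rewrite author's own statement) =====
-- stated objective: idiomatic
-- what changed: Replaces A's per-part class-wide mask construction and S_IRWXU/G/O filtering with a nested bit table (who-char -> perm-char -> single stat bit) and a double loop over the characters, OR-ing one bit per valid (who, perm) pair.
import Mathlib
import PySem

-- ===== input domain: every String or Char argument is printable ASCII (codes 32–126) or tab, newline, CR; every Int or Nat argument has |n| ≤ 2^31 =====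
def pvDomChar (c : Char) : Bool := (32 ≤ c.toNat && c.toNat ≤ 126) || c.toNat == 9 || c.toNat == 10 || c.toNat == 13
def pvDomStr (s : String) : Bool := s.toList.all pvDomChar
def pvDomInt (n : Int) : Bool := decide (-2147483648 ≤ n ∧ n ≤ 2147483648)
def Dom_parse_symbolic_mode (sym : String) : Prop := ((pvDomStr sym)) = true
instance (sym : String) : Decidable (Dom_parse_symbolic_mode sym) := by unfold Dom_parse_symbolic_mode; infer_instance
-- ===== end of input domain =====

-- B replaces A's class-wide mask building and S_IRWX* filtering by a nested
-- bit table indexed by who-char then perm-char, OR-ing one bit per valid pair.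
-- Proved equal on Pre_ (every comma part has exactly one '='; elsewhere both raise ValueError).

-- ===== PORT A =====
-- the stat-module constants A uses
def pvS_IRUSR : Int := 256
def pvS_IWUSR : Int := 128
def pvS_IXUSR : Int := 64
def pvS_IRGRP : Int := 32
def pvS_IWGRP : Int := 16
def pvS_IXGRP : Int := 8
def pvS_IROTH : Int := 4
def pvS_IWOTH : Int := 2
def pvS_IXOTH : Int := 1
def pvS_IRWXU : Int := 448
def pvS_IRWXG : Int := 56
def pvS_IRWXO : Int := 7

-- body of A's for-loop: mode |= bits computed from one comma part
def pvPartA (mode : Int) (part : List Char) : Int :=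
  match PySem.Chars.splitOn part ['='] with
  | [who, perms] =>
    let mask : Int := 0
    let mask := if PySem.Chars.isIn ['r'] perms then
        PySem.Int.bor mask (PySem.Int.bor pvS_IRUSR (PySem.Int.bor pvS_IRGRP pvS_IROTH)) else mask
    let mask := if PySem.Chars.isIn ['w'] perms then
        PySem.Int.bor mask (PySem.Int.bor pvS_IWUSR (PySem.Int.bor pvS_IWGRP pvS_IWOTH)) else mask
    let mask := if PySem.Chars.isIn ['x'] perms then
        PySem.Int.bor mask (PySem.Int.bor pvS_IXUSR (PySem.Int.bor pvS_IXGRP pvS_IXOTH)) else mask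
    let bits : Int := 0
    let bits := if PySem.Chars.isIn ['u'] who then PySem.Int.bor bits (PySem.Int.band mask pvS_IRWXU) else bits
    let bits := if PySem.Chars.isIn ['g'] who then PySem.Int.bor bits (PySem.Int.band mask pvS_IRWXG) else bits
    let bits := if PySem.Chars.isIn ['o'] who then PySem.Int.bor bits (PySem.Int.band mask pvS_IRWXO) else bits
    PySem.Int.bor mode bits
  | _ => mode  -- Python raises ValueError (unpacking) here; excluded by Pre_

def parse_symbolic_mode (sym : String) : Int :=
  (PySem.Chars.splitOn sym.toList [',']).foldl pvPartA 0

-- ===== PORT B =====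
-- Source B's nested dict _BIT: who-char -> (perm-char -> single stat bit)
def pvBIT : PySem.Dict Char (PySem.Dict Char Int) :=
  PySem.Dict.mk
    [('u', PySem.Dict.mk [('r', 256), ('w', 128), ('x', 64)]),
     ('g', PySem.Dict.mk [('r', 32), ('w', 16), ('x', 8)]),
     ('o', PySem.Dict.mk [('r', 4), ('w', 2), ('x', 1)])]

-- body of B's for-loop over one comma part
def pvPartB (mode : Int) (part : List Char) : Int :=
  match PySem.Chars.splitOn part ['='] with
  | [who, perms] =>
    who.foldl (fun mode w =>
      match PySem.Dict.get? pvBIT w with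
      | none => mode
      | some table => perms.foldl (fun mode p => PySem.Int.bor mode (PySem.Dict.getD table p 0)) mode) mode
  | _ => mode  -- Python raises ValueError (unpacking) here; excluded by Pre_

def parse_symbolic_mode_alt (sym : String) : Int :=
  (PySem.Chars.splitOn sym.toList [',']).foldl pvPartB 0

-- ===== PRECONDITION & SPEC =====
-- Pre_ excludes exactly the inputs where the tuple unpacking of a comma part raises
-- ValueError (a part without exactly one '='); both A and B raise there.
def Pre_parse_symbolic_mode (sym : String) : Prop :=
  ∀ part ∈ PySem.Chars.splitOn sym.toList [','], (PySem.Chars.splitOn part ['=']).length = 2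
instance (sym : String) : Decidable (Pre_parse_symbolic_mode sym) := by
  unfold Pre_parse_symbolic_mode; infer_instance

def pvWitness_parse_symbolic_mode : String := "u=rw,g=r,o=x"

def Spec_parse_symbolic_mode (sym : String) (out : Int) : Prop := out = parse_symbolic_mode_alt sym
instance (sym : String) (out : Int) : Decidable (Spec_parse_symbolic_mode sym out) := by
  unfold Spec_parse_symbolic_mode; infer_instance

-- ===== CLAIM (what is proved, stated in full; the proofs are below) =====
def Claim_equal_parse_symbolic_mode : Prop := ∀ (sym : String), Dom_parse_symbolic_mode sym → Pre_parse_symbolic_mode sym → Spec_parse_symbolic_mode sym (parse_symbolic_mode sym)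

-- ===== LEMMAS AND PROOFS =====

-- Nat-level value of one table entry: bit for who-char w and perm-char p (0 off the tables)
def pvTblN (w p : Char) : Nat :=
  if p = 'r' then (if w = 'u' then 256 else if w = 'g' then 32 else if w = 'o' then 4 else 0)
  else if p = 'w' then (if w = 'u' then 128 else if w = 'g' then 16 else if w = 'o' then 2 else 0)
  else if p = 'x' then (if w = 'u' then 64 else if w = 'g' then 8 else if w = 'o' then 1 else 0)
  else 0

def pvPermN (w : Char) (perms : List Char) : Nat :=
  (if 'r' ∈ perms then pvTblN w 'r' else 0) |||
    ((if 'w' ∈ perms then pvTblN w 'w' else 0) ||| (if 'x' ∈ perms then pvTblN w 'x' else 0))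

def pvBitsN (who perms : List Char) : Nat :=
  (if 'u' ∈ who then pvPermN 'u' perms else 0) |||
    ((if 'g' ∈ who then pvPermN 'g' perms else 0) ||| (if 'o' ∈ who then pvPermN 'o' perms else 0))

theorem isIn_single (c : Char) (s : List Char) : PySem.Chars.isIn [c] s = decide (c ∈ s) := by
  by_cases h : c ∈ s
  · simp only [h, decide_true]
    obtain ⟨l, r, rfl⟩ := List.append_of_mem h
    exact (PySem.Chars.isIn_iff_infix [c] (l ++ c :: r)).mpr ⟨l, r, by simp⟩
  · simp only [h, decide_false]
    rw [PySem.Chars.isIn_eq_false_iff]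
    intro hinf
    exact h (hinf.subset (by simp))

theorem lor_left_comm' (a b c : Nat) : a ||| (b ||| c) = b ||| (a ||| c) := by
  rw [← Nat.lor_assoc, Nat.lor_comm a b, Nat.lor_assoc]

theorem bor_eq_of_cast (mN : Nat) (x : Int) (k : Nat) (h : x = (k : Int)) :
    PySem.Int.bor (↑mN) x = ↑(mN ||| k) := by
  subst h; exact PySem.Int.bor_natCast mN k

-- A's bits for one part equal the Nat-level table OR
theorem partA_eq (who perms : List Char) (part : List Char) (mN : Nat)
    (h : PySem.Chars.splitOn part ['='] = [who, perms]) :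
    pvPartA (↑mN) part = ↑(mN ||| pvBitsN who perms) := by
  unfold pvPartA
  rw [h]
  by_cases hr : 'r' ∈ perms <;> by_cases hw : 'w' ∈ perms <;> by_cases hx : 'x' ∈ perms <;>
    by_cases hu : 'u' ∈ who <;> by_cases hg : 'g' ∈ who <;> by_cases ho : 'o' ∈ who <;>
      simp only [isIn_single, hr, hw, hx, hu, hg, ho, decide_true, decide_false, if_true, if_false,
        pvBitsN, pvPermN, pvTblN, pvS_IRUSR, pvS_IWUSR, pvS_IXUSR, pvS_IRGRP, pvS_IWGRP, pvS_IXGRP,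
        pvS_IROTH, pvS_IWOTH, pvS_IXOTH, pvS_IRWXU, pvS_IRWXG, pvS_IRWXO] <;>
      exact bor_eq_of_cast mN _ _ (by decide)

theorem getD_tbl_gen (a b c : Int) (p : Char) :
    PySem.Dict.getD (PySem.Dict.mk [('r', a), ('w', b), ('x', c)]) p 0 =
      if p = 'r' then a else if p = 'w' then b else if p = 'x' then c else 0 := by
  by_cases h1 : p = 'r'
  · subst h1; rfl
  · by_cases h2 : p = 'w'
    · subst h2; rfl
    · by_cases h3 : p = 'x'
      · subst h3; rfl
      · simp [PySem.Dict.getD, PySem.Dict.get?, List.find?, h1, h2, h3,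
          show ('r' == p) = false from by simpa using Ne.symm h1,
          show ('w' == p) = false from by simpa using Ne.symm h2,
          show ('x' == p) = false from by simpa using Ne.symm h3]

theorem getD_pvTbl (t : PySem.Dict Char Int) (w p : Char)
    (hw : (w = 'u' ∧ t = PySem.Dict.mk [('r', 256), ('w', 128), ('x', 64)]) ∨
          (w = 'g' ∧ t = PySem.Dict.mk [('r', 32), ('w', 16), ('x', 8)]) ∨
          (w = 'o' ∧ t = PySem.Dict.mk [('r', 4), ('w', 2), ('x', 1)])) :
    PySem.Dict.getD t p 0 = ↑(pvTblN w p) := by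
  rcases hw with ⟨rfl, rfl⟩ | ⟨rfl, rfl⟩ | ⟨rfl, rfl⟩ <;>
    rw [getD_tbl_gen] <;> simp [pvTblN]

theorem pvTblN_other (w p : Char) (hr : p ≠ 'r') (hww : p ≠ 'w') (hxx : p ≠ 'x') :
    pvTblN w p = 0 := by
  simp [pvTblN, hr, hww, hxx]

-- one step of B's inner loop at the Nat level
theorem permN_cons (w p : Char) (rest : List Char) (mN : Nat) :
    mN ||| pvTblN w p ||| pvPermN w rest = mN ||| pvPermN w (p :: rest) := by
  by_cases hr : p = 'r'
  · subst hr
    simp only [pvPermN, List.mem_cons, show ('w' = 'r') = False from by simp, show ('x' = 'r') = False from by simp,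
      true_or, false_or, if_true]
    split_ifs <;> simp [Nat.lor_comm, lor_left_comm', Nat.or_self]
  · by_cases hww : p = 'w'
    · subst hww
      simp only [pvPermN, List.mem_cons, show ('r' = 'w') = False from by simp, show ('x' = 'w') = False from by simp,
        true_or, false_or, if_true]
      split_ifs <;> simp [Nat.lor_comm, lor_left_comm', Nat.or_self]
    · by_cases hxx : p = 'x'
      · subst hxx
        simp only [pvPermN, List.mem_cons, show ('r' = 'x') = False from by simp, show ('w' = 'x') = False from by simp,
          true_or, false_or, if_true]
        split_ifs <;> simp [Nat.lor_comm, lor_left_comm', Nat.or_self]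
      · simp [pvPermN, List.mem_cons, Ne.symm hr, Ne.symm hww, Ne.symm hxx,
          pvTblN_other w p hr hww hxx]

-- inner loop of B over the perm characters
theorem permLoop (t : PySem.Dict Char Int) (w : Char)
    (hw : (w = 'u' ∧ t = PySem.Dict.mk [('r', 256), ('w', 128), ('x', 64)]) ∨
          (w = 'g' ∧ t = PySem.Dict.mk [('r', 32), ('w', 16), ('x', 8)]) ∨
          (w = 'o' ∧ t = PySem.Dict.mk [('r', 4), ('w', 2), ('x', 1)])) :
    ∀ (perms : List Char) (mN : Nat),
      perms.foldl (fun mode p => PySem.Int.bor mode (PySem.Dict.getD t p 0)) (↑mN)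
        = ↑(mN ||| pvPermN w perms) := by
  intro perms
  induction perms with
  | nil => intro mN; simp [pvPermN]
  | cons p rest ih =>
    intro mN
    simp only [List.foldl_cons, getD_pvTbl t w p hw, PySem.Int.bor_natCast, ih]
    rw [permN_cons]

def pvWhoN (w : Char) (perms : List Char) : Nat :=
  if w = 'u' then pvPermN 'u' perms
  else if w = 'g' then pvPermN 'g' perms
  else if w = 'o' then pvPermN 'o' perms else 0

-- one step of B's outer loop at the Nat level
theorem bitsN_cons (w : Char) (rest perms : List Char) (mN : Nat) :
    mN ||| pvWhoN w perms ||| pvBitsN rest perms = mN ||| pvBitsN (w :: rest) perms := by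
  by_cases hu : w = 'u'
  · subst hu
    simp only [pvBitsN, pvWhoN, List.mem_cons, show ('g' = 'u') = False from by simp, show ('o' = 'u') = False from by simp,
      true_or, false_or, if_true]
    split_ifs <;> simp [Nat.lor_comm, lor_left_comm', Nat.or_self]
  · by_cases hg : w = 'g'
    · subst hg
      simp only [pvBitsN, pvWhoN, List.mem_cons, show ('u' = 'g') = False from by simp, show ('o' = 'g') = False from by simp,
        true_or, false_or, if_true]
      split_ifs <;> simp [Nat.lor_comm, lor_left_comm', Nat.or_self]
    · by_cases ho : w = 'o'
      · subst ho
        simp only [pvBitsN, pvWhoN, List.mem_cons, show ('u' = 'o') = False from by simp, show ('g' = 'o') = False from by simp,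
          true_or, false_or, if_true]
        split_ifs <;> simp [Nat.lor_comm, lor_left_comm', Nat.or_self]
      · simp [pvBitsN, pvWhoN, List.mem_cons, Ne.symm hu, Ne.symm hg, Ne.symm ho, hu, hg, ho]

-- outer loop of B over the who characters
theorem whoLoop (perms : List Char) :
    ∀ (who : List Char) (mN : Nat),
      who.foldl (fun mode w =>
        match PySem.Dict.get? pvBIT w with
        | none => mode
        | some table => perms.foldl (fun mode p => PySem.Int.bor mode (PySem.Dict.getD table p 0)) mode)
        (↑mN) = ↑(mN ||| pvBitsN who perms) := by
  intro who
  induction who with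
  | nil => intro mN; simp [pvBitsN]
  | cons w rest ih =>
    intro mN
    simp only [List.foldl_cons]
    by_cases hu : w = 'u'
    · subst hu
      simp only [show PySem.Dict.get? pvBIT 'u' = some (PySem.Dict.mk [('r', 256), ('w', 128), ('x', 64)]) from rfl]
      rw [permLoop _ 'u' (Or.inl ⟨rfl, rfl⟩) perms mN, ih]
      rw [show pvPermN 'u' perms = pvWhoN 'u' perms from by simp [pvWhoN], bitsN_cons]
    · by_cases hg : w = 'g'
      · subst hg
        simp only [show PySem.Dict.get? pvBIT 'g' = some (PySem.Dict.mk [('r', 32), ('w', 16), ('x', 8)]) from rfl]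
        rw [permLoop _ 'g' (Or.inr (Or.inl ⟨rfl, rfl⟩)) perms mN, ih]
        rw [show pvPermN 'g' perms = pvWhoN 'g' perms from by simp [pvWhoN], bitsN_cons]
      · by_cases ho : w = 'o'
        · subst ho
          simp only [show PySem.Dict.get? pvBIT 'o' = some (PySem.Dict.mk [('r', 4), ('w', 2), ('x', 1)]) from rfl]
          rw [permLoop _ 'o' (Or.inr (Or.inr ⟨rfl, rfl⟩)) perms mN, ih]
          rw [show pvPermN 'o' perms = pvWhoN 'o' perms from by simp [pvWhoN], bitsN_cons]
        · rw [show PySem.Dict.get? pvBIT w = none from by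
            simp [pvBIT, PySem.Dict.get?, List.find?,
              show ('u' == w) = false from by simpa using Ne.symm hu,
              show ('g' == w) = false from by simpa using Ne.symm hg,
              show ('o' == w) = false from by simpa using Ne.symm ho], ih]
          have h := bitsN_cons w rest perms mN
          rw [show pvWhoN w perms = 0 from by simp [pvWhoN, hu, hg, ho]] at h
          rw [← h]
          simp

theorem partB_eq (who perms : List Char) (part : List Char) (mN : Nat)
    (h : PySem.Chars.splitOn part ['='] = [who, perms]) :
    pvPartB (↑mN) part = ↑(mN ||| pvBitsN who perms) := by
  unfold pvPartB
  rw [h]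
  exact whoLoop perms who mN

theorem mainLoop : ∀ (parts : List (List Char)) (mN : Nat),
    (∀ part ∈ parts, (PySem.Chars.splitOn part ['=']).length = 2) →
    parts.foldl pvPartA (↑mN) = parts.foldl pvPartB (↑mN) := by
  intro parts
  induction parts with
  | nil => intro mN _; rfl
  | cons part rest ih =>
    intro mN hall
    have h2 := hall part (by simp)
    rcases hsp : PySem.Chars.splitOn part ['='] with _ | ⟨who, _ | ⟨perms, _ | _⟩⟩ <;>
      rw [hsp] at h2 <;> simp at h2
    simp only [List.foldl_cons, partA_eq who perms part mN hsp, partB_eq who perms part mN hsp]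
    exact ih _ (fun q hq => hall q (by simp [hq]))

-- ===== VERDICT (by name: the statement is the Claim_ definition above) =====
theorem parse_symbolic_mode_spec : Claim_equal_parse_symbolic_mode := by
  unfold Claim_equal_parse_symbolic_mode
  intro sym _ hpre
  unfold Spec_parse_symbolic_mode parse_symbolic_mode parse_symbolic_mode_alt
  have := mainLoop (PySem.Chars.splitOn sym.toList [',']) 0 hpre
  simpa using this
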